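-- pv_equiv track=rewrite | github.com/p0pkern/advent_of_code_Python3 | day_3/life_support.py | filter_CO2
-- ===== SOURCE A (Python) =====
-- def line_count(lines, index):
--     zeros =  ones = 0
--
--     for i in range(len(lines)):
--         if lines[i][index] == "0":
--             zeros += 1
--         else:
--             ones += 1
--
--     return zeros, ones
--
-- def filter_CO2(line_list, index):
--    """
--    """
--
--    zeros, ones = line_count(line_list, index)
--
--
--    out_list = []
--    for line in line_list:
--        if zeros <= ones:
--             if line[index] == "0":
--                out_list.append(line)
--        elif ones < zeros:
--            if line[index] == "1":
--                out_list.append(line)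
--        else:
--            out_list.append(line)
--    return out_list
-- ===== SOURCE B (Python) =====
-- def filter_CO2(line_list, index):
--     zeros_list = []
--     ones_list = []
--     for line in line_list:
--         if line[index] == "0":
--             zeros_list.append(line)
--         elif line[index] == "1":
--             ones_list.append(line)
--     zeros = len(zeros_list)
--     ones = len(line_list) - zeros
--     return zeros_list if zeros <= ones else ones_list
-- ===== Notes on version B (the rewrite author's own statement) =====
-- stated objective: simpler
-- what changed: Single pass partitioning lines into zeros/ones lists (counting by list length, ones as total minus zeros), replacing A's separate counting pass plus a second re-comparing filter loop.
import Mathlib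
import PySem

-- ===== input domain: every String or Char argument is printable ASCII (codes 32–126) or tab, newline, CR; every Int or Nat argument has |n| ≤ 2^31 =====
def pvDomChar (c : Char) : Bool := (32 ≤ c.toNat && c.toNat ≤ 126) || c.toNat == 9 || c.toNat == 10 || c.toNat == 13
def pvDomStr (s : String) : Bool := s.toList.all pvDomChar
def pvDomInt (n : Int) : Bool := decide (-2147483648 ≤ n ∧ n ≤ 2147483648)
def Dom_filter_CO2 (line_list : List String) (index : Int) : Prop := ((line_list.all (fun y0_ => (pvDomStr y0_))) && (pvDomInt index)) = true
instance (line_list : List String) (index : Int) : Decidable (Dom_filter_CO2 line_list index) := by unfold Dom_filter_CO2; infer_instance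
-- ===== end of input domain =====

-- B replaces A's count-then-refilter two-pass scheme by one partitioning pass
-- (zeros/ones lists; counts read off as lengths): simpler decomposition.


-- shared primitive: line[index] (exact Python indexing via PySem; default never read under Pre_)
def charAt (l : String) (index : Int) : Char := (PySem.Str.pyGet? l index).getD ' '

-- ===== PORT A =====
def line_count (lines : List String) (index : Int) : Int × Int :=
  (PySem.List.pyRange 0 lines.length 1).foldl
    (fun (st : Int × Int) i =>
      if charAt ((PySem.List.pyGetD lines i "")) index = '0' then (st.1 + 1, st.2)
      else (st.1, st.2 + 1))
    (0, 0)

def filter_CO2 (line_list : List String) (index : Int) : List String :=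
  let zo := line_count line_list index
  line_list.foldl
    (fun out line =>
      if zo.1 ≤ zo.2 then
        (if charAt line index = '0' then out ++ [line] else out)
      else if zo.2 < zo.1 then
        (if charAt line index = '1' then out ++ [line] else out)
      else out ++ [line])
    []

-- ===== PORT B =====
def partitionB (line_list : List String) (index : Int) : List String × List String :=
  match line_list with
  | [] => ([], [])
  | l :: rest =>
    let p := partitionB rest index
    if charAt l index = '0' then (l :: p.1, p.2)
    else if charAt l index = '1' then (p.1, l :: p.2)
    else p

def filter_CO2_alt (line_list : List String) (index : Int) : List String :=
  let p := partitionB line_list index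
  let zeros : Int := p.1.length
  let ones : Int := (line_list.length : Int) - zeros
  if zeros ≤ ones then p.1 else p.2

-- ===== PRECONDITION & SPEC =====
-- Pre_ excludes exactly the inputs where Python A raises IndexError: some line
-- has no character at position `index` (Python's negative indexing included).
def Pre_filter_CO2 (line_list : List String) (index : Int) : Prop :=
  ∀ l ∈ line_list, PySem.Raise.InRange l.toList.length index
instance (line_list : List String) (index : Int) : Decidable (Pre_filter_CO2 line_list index) := by unfold Pre_filter_CO2; infer_instance

def pvWitness_filter_CO2 : List String × Int := (["01", "10", "11"], 0)

def Spec_filter_CO2 (line_list : List String) (index : Int) (out : List String) : Prop := out = filter_CO2_alt line_list index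
instance (line_list : List String) (index : Int) (out : List String) : Decidable (Spec_filter_CO2 line_list index out) := by unfold Spec_filter_CO2; infer_instance

-- ===== CLAIM (what is proved, stated in full; the proofs are below) =====
def Claim_equal_filter_CO2 : Prop := ∀ (line_list : List String) (index : Int), Dom_filter_CO2 line_list index → Pre_filter_CO2 line_list index → Spec_filter_CO2 line_list index (filter_CO2 line_list index)

-- ===== LEMMAS AND PROOFS =====

-- line_count's index loop is a fold over the list itself
lemma line_count_eq (lines : List String) (index : Int) :
    line_count lines index =
      lines.foldl (fun (st : Int × Int) l =>
        if charAt l index = '0' then (st.1 + 1, st.2) else (st.1, st.2 + 1)) (0, 0) := by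
  unfold line_count
  rw [PySem.List.foldl_pyRange_zero_pyGetD' lines "" (fun st l => if charAt l index = '0' then (st.1 + 1, st.2) else (st.1, st.2 + 1)) (0, 0)]

lemma line_count_fold (lines : List String) (index : Int) (z o : Int) :
    lines.foldl (fun (st : Int × Int) l =>
        if charAt l index = '0' then (st.1 + 1, st.2) else (st.1, st.2 + 1)) (z, o) =
      (z + lines.countP (fun l => charAt l index == '0'),
       o + ((lines.length : Int) - lines.countP (fun l => charAt l index == '0'))) := by
  induction lines generalizing z o with
  | nil => simp
  | cons l rest ih =>
    by_cases h : charAt l index = '0' <;>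
      simp [List.foldl_cons, h, ih] <;> omega

lemma partitionB_spec (lines : List String) (index : Int) :
    partitionB lines index =
      (lines.filter (fun l => charAt l index == '0'),
       lines.filter (fun l => charAt l index == '1')) := by
  induction lines with
  | nil => rfl
  | cons l rest ih =>
    by_cases h0 : charAt l index = '0'
    · simp [partitionB, ih, h0]
    · by_cases h1 : charAt l index = '1' <;> simp [partitionB, ih, h0, h1]

lemma foldA_zero (lines : List String) (index : Int) (acc : List String) :
    lines.foldl (fun out line => if charAt line index = '0' then out ++ [line] else out) acc =
      acc ++ lines.filter (fun l => charAt l index == '0') := by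
  induction lines generalizing acc with
  | nil => simp
  | cons l rest ih =>
    by_cases h : charAt l index = '0' <;> simp [List.foldl_cons, h, ih]

lemma foldA_one (lines : List String) (index : Int) (acc : List String) :
    lines.foldl (fun out line => if charAt line index = '1' then out ++ [line] else out) acc =
      acc ++ lines.filter (fun l => charAt l index == '1') := by
  induction lines generalizing acc with
  | nil => simp
  | cons l rest ih =>
    by_cases h : charAt l index = '1' <;> simp [List.foldl_cons, h, ih]

-- ===== VERDICT (by name: the statement is the Claim_ definition above) =====
theorem filter_CO2_spec : Claim_equal_filter_CO2 := by
  intro line_list index _ _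
  unfold Spec_filter_CO2 filter_CO2 filter_CO2_alt
  rw [line_count_eq, line_count_fold, partitionB_spec]
  set c0 : Int := (line_list.countP (fun l => charAt l index == '0') : Int) with hc0
  by_cases h : 0 + c0 ≤ 0 + ((line_list.length : Int) - c0)
  · have h' : c0 ≤ (line_list.length : Int) - c0 := by omega
    simp only [h, if_true]
    rw [foldA_zero]
    have : ((line_list.filter (fun l => charAt l index == '0')).length : Int) = c0 := by
      simp [hc0, List.countP_eq_length_filter]
    simp [this, h']
  · have h' : ¬ ((line_list.filter (fun l => charAt l index == '0')).length : Int) ≤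
        (line_list.length : Int) - (line_list.filter (fun l => charAt l index == '0')).length := by
      have : ((line_list.filter (fun l => charAt l index == '0')).length : Int) = c0 := by
        simp [hc0, List.countP_eq_length_filter]
      omega
    have h2 : 0 + ((line_list.length : Int) - c0) < 0 + c0 := by omega
    simp only [h, if_false, if_pos h2]
    rw [foldA_one]
    simp [h']
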